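-- pv_equiv track=rewrite | github.com/tempuku/algorithmic | yandex/interesting_travel.py | graph_create
-- ===== SOURCE A (Python) =====
-- from collections import defaultdict
--
-- def graph_create(cities_nodes, distance_max):
--     graph = defaultdict(list)
--     for i in range(len(cities_nodes)):
--         for j in range(len(cities_nodes)):
--             if i == j:
--                 continue
--             distance = abs(cities_nodes[i][0] - cities_nodes[j][0]) + abs(cities_nodes[i][1] - cities_nodes[j][1])
--             if distance <= distance_max:
--                 graph[i].append(j)
--     return graph
-- ===== SOURCE B (Python) =====
-- from collections import defaultdict
--
--
-- def graph_create(cities_nodes, distance_max):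
--     # Rotate coordinates (u, v) = (x + y, x - y): the Manhattan ball becomes a
--     # Chebyshev box, so after sorting by u a sweep only examines the window of
--     # earlier points with u_p - u_q <= distance_max (sorted order justifies the
--     # early break), collecting each qualifying pair once in both directions;
--     # the edge list is then sorted and grouped into the adjacency dict.
--     pts = sorted(((x + y, x - y, i) for i, (x, y) in enumerate(cities_nodes)),
--                  key=lambda t: (t[0], t[1]))
--     edges = []
--     for p in range(len(pts)):
--         u, v, i = pts[p]
--         q = p - 1
--         while q >= 0 and u - pts[q][0] <= distance_max:
--             if abs(v - pts[q][1]) <= distance_max: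
--                 edges.append((i, pts[q][2]))
--                 edges.append((pts[q][2], i))
--             q -= 1
--     graph = defaultdict(list)
--     for i, j in sorted(edges):
--         graph[i].append(j)
--     return graph
-- ===== Notes on version B (the rewrite author's own statement) =====
-- stated objective: alternative
-- what changed: Replaces A's all-pairs nested distance scan with a plane-sweep algorithm: coordinates are rotated to (x+y, x-y) so the Manhattan ball becomes a Chebyshev box, the points are sorted by the rotated coordinates, each point is compared only against the window of predecessors within distance_max in the first rotated coordinate (breaking early, justified by the sorted order), and the collected edge list is sorted and grouped into the adjacency dict.
import Mathlib
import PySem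

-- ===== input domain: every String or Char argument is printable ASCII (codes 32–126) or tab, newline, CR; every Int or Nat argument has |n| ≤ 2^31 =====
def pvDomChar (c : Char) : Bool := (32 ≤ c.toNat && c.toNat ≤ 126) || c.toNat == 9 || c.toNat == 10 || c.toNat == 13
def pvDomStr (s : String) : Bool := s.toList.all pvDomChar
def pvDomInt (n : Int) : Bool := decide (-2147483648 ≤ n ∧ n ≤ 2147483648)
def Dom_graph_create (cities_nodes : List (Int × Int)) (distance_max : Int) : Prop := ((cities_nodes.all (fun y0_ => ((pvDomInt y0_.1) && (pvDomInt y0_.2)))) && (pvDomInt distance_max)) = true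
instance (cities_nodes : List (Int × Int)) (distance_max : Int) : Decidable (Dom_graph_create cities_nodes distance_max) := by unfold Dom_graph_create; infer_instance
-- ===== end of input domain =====

-- B replaces A's all-pairs double scan by a plane sweep: it rotates each city to
-- (u, v) = (x + y, x - y) (Manhattan ball -> Chebyshev box), sorts by (u, v),
-- collects each qualifying pair once inside the sliding u-window (breaking early,
-- which the sorted order justifies), and finally sorts and groups the edge list.

-- ===== PORT A =====
def graph_create (cities_nodes : List (Int × Int)) (distance_max : Int) : List (Int × List Int) :=
  ((List.range cities_nodes.length).foldl (fun graph i =>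
    (List.range cities_nodes.length).foldl (fun graph j =>
      if i = j then graph
      else
        let distance := |(cities_nodes.getD i (0,0)).1 - (cities_nodes.getD j (0,0)).1| +
                        |(cities_nodes.getD i (0,0)).2 - (cities_nodes.getD j (0,0)).2|
        if distance ≤ distance_max then
          graph.insert (i : Int) (graph.getD (i : Int) [] ++ [(j : Int)])
        else graph) graph)
    (PySem.Dict.empty : PySem.Dict Int (List Int))).items

-- ===== PORT B =====
-- the rotated triples (x + y, x - y, index), sorted by (u, v)  ('pts = sorted(..., key=...)')
def pvMkPts (cities_nodes : List (Int × Int)) : List (Int × Int × Int) :=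
  PySem.List.sorted2
    ((PySem.List.enumerate cities_nodes).map (fun p => (p.2.1 + p.2.2, p.2.1 - p.2.2, p.1)))
    (fun t => t.1) (fun t => t.2.1)

-- the inner 'while q >= 0 and u - pts[q][0] <= distance_max' loop; the Nat argument is q + 1
def pvWhile (pts : List (Int × Int × Int)) (dm u v i : Int) :
    Nat → List (Int × Int) → List (Int × Int)
  | 0, edges => edges
  | (q+1), edges =>
      let t := pts.getD q (0, 0, 0)
      if u - t.1 ≤ dm then
        pvWhile pts dm u v i q
          (if |v - t.2.1| ≤ dm then edges ++ [(i, t.2.2), (t.2.2, i)] else edges)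
      else edges

def graph_create_alt (cities_nodes : List (Int × Int)) (distance_max : Int) : List (Int × List Int) :=
  let pts := pvMkPts cities_nodes
  let edges := (List.range pts.length).foldl (fun edges p =>
      let t := pts.getD p (0, 0, 0)
      pvWhile pts distance_max t.1 t.2.1 t.2.2 p edges) []
  ((PySem.List.sorted2 edges (fun e => e.1) (fun e => e.2)).foldl
      (fun g e => g.insert e.1 (g.getD e.1 [] ++ [e.2]))
      (PySem.Dict.empty : PySem.Dict Int (List Int))).items

-- ===== PRECONDITION & SPEC =====
def Spec_graph_create (cities_nodes : List (Int × Int)) (distance_max : Int) (out : List (Int × List Int)) : Prop := out = graph_create_alt cities_nodes distance_max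
instance (cities_nodes : List (Int × Int)) (distance_max : Int) (out : List (Int × List Int)) : Decidable (Spec_graph_create cities_nodes distance_max out) := by unfold Spec_graph_create; infer_instance

-- ===== CLAIM (what is proved, stated in full; the proofs are below) =====
def Claim_equal_graph_create : Prop := ∀ (cities_nodes : List (Int × Int)) (distance_max : Int), Dom_graph_create cities_nodes distance_max → Spec_graph_create cities_nodes distance_max (graph_create cities_nodes distance_max)

-- ===== LEMMAS AND PROOFS =====

-- `pvClose cs d i j` : i ≠ j and the Manhattan distance between nodes i and j is ≤ d.
def pvClose (cs : List (Int × Int)) (d : Int) (i j : Nat) : Bool :=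
  decide (i ≠ j) &&
  decide (|(cs.getD i (0,0)).1 - (cs.getD j (0,0)).1| + |(cs.getD i (0,0)).2 - (cs.getD j (0,0)).2| ≤ d)

-- all neighbors of k, ascending
def pvNbrs (cs : List (Int × Int)) (d : Int) (k : Nat) : List Int :=
  ((List.range cs.length).filter (pvClose cs d k)).map (fun j => Int.ofNat j)

def pvWrap (i : Nat) (l : List Int) : List (Int × List Int) :=
  if l = [] then [] else [((i : Int), l)]

-- the common canonical value of both programs
def pvCanon (cs : List (Int × Int)) (d : Int) : List (Int × List Int) :=
  (List.range cs.length).flatMap (fun i => pvWrap i (pvNbrs cs d i))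

-- the canonical ordered-edge list, grouped blocks in ascending order
def pvEdgesC (cs : List (Int × Int)) (d : Int) : List (Int × Int) :=
  (List.range cs.length).flatMap (fun a => (pvNbrs cs d a).map (fun j => ((a : Int), j)))

-- basic facts about pvClose
lemma pvClose_self (cs : List (Int × Int)) (d : Int) (k : Nat) : pvClose cs d k k = false := by
  simp [pvClose]

lemma pvClose_symm (cs : List (Int × Int)) (d : Int) (i j : Nat) :
    pvClose cs d i j = pvClose cs d j i := by
  unfold pvClose
  rw [abs_sub_comm ((cs.getD i (0,0)).1) ((cs.getD j (0,0)).1),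
      abs_sub_comm ((cs.getD i (0,0)).2) ((cs.getD j (0,0)).2)]
  by_cases h : i = j <;> simp [h, Ne, eq_comm]

-- a dict whose items are g.items ++ pvWrap i l0, with i fresh for g: lookup and append-insert
lemma pvDictGetD (g d' : PySem.Dict Int (List Int)) (i : Nat) (l0 : List Int)
    (hg : g.contains (i : Int) = false) (hnd : g.keys.Nodup)
    (hd : d'.items = g.items ++ pvWrap i l0) :
    d'.getD (i : Int) [] = l0 := by
  have hmem : (i : Int) ∉ g.keys := by
    intro h
    rw [← PySem.Dict.contains_iff_mem_keys] at h
    rw [hg] at h; cases h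
  by_cases h0 : l0 = []
  · subst h0
    have : d' = g := PySem.Dict.ext (by simpa [pvWrap] using hd)
    rw [this]
    exact PySem.Dict.getD_of_not_contains g [] hg
  · have hitems : d'.items = g.items ++ [((i : Int), l0)] := by simpa [pvWrap, h0] using hd
    have hk : d'.keys.Nodup := by
      have : d'.keys = g.keys ++ [(i : Int)] := by
        simp only [PySem.Dict.keys, hitems, List.map_append, List.map_cons, List.map_nil]
      rw [this]
      simp [List.nodup_append, hnd]
      intro a ha he
      exact hmem (he ▸ ha)
    exact PySem.Dict.getD_of_mem_items d' (by rw [hitems]; simp) hk []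

lemma pvDictInsert (g d' : PySem.Dict Int (List Int)) (i : Nat) (l0 v : List Int)
    (hg : g.contains (i : Int) = false) (hnd : g.keys.Nodup)
    (hd : d'.items = g.items ++ pvWrap i l0) :
    (d'.insert (i : Int) v).items = g.items ++ [((i : Int), v)] := by
  have hmem : (i : Int) ∉ g.keys := by
    intro h
    rw [← PySem.Dict.contains_iff_mem_keys] at h
    rw [hg] at h; cases h
  have hfst : ∀ p ∈ g.items, p.1 ≠ (i : Int) := by
    intro p hp hpe
    exact hmem (by simp only [PySem.Dict.keys]; exact List.mem_map.2 ⟨p, hp, hpe⟩)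
  by_cases h0 : l0 = []
  · subst h0
    have : d' = g := PySem.Dict.ext (by simpa [pvWrap] using hd)
    rw [this, PySem.Dict.items_insert_of_not_contains g v hg]
  · have hitems : d'.items = g.items ++ [((i : Int), l0)] := by simpa [pvWrap, h0] using hd
    have hc : d'.contains (i : Int) = true := by
      rw [PySem.Dict.contains_iff_mem_keys]
      simp only [PySem.Dict.keys, hitems, List.map_append]
      simp
    rw [PySem.Dict.items_insert_of_contains d' v hc, hitems, List.map_append]
    congr 1
    · conv_rhs => rw [← List.map_id g.items]
      apply List.map_congr_left
      intro p hp
      simp [hfst p hp]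
    · simp

-- A's inner loop: repeated appends at the single (fresh-for-g) key i accumulate at the end
lemma pvInnerA (cs : List (Int × Int)) (dm : Int) (i : Nat) (L : List Nat) :
    ∀ (g d' : PySem.Dict Int (List Int)) (l0 : List Int),
    g.contains (i : Int) = false → g.keys.Nodup →
    d'.items = g.items ++ pvWrap i l0 →
    (L.foldl (fun graph j =>
      if i = j then graph
      else
        let distance := |(cs.getD i (0,0)).1 - (cs.getD j (0,0)).1| +
                        |(cs.getD i (0,0)).2 - (cs.getD j (0,0)).2|
        if distance ≤ dm then
          graph.insert (i : Int) (graph.getD (i : Int) [] ++ [(j : Int)])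
        else graph) d').items
    = g.items ++ pvWrap i (l0 ++ (L.filter (pvClose cs dm i)).map (fun j => Int.ofNat j)) := by
  induction L with
  | nil =>
    intro g d' l0 hg hnd hd
    rw [List.foldl_nil, List.filter_nil, List.map_nil, List.append_nil]
    exact hd
  | cons j L ih =>
    intro g d' l0 hg hnd hd
    rw [List.foldl_cons]
    by_cases hij : i = j
    · have hcl : pvClose cs dm i j = false := by rw [hij]; exact pvClose_self cs dm j
      have hfil : (j :: L).filter (pvClose cs dm i) = L.filter (pvClose cs dm i) := by
        simp [hcl]
      rw [if_pos hij, hfil]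
      exact ih g d' l0 hg hnd hd
    · rw [if_neg hij]
      by_cases hdist : |(cs.getD i (0,0)).1 - (cs.getD j (0,0)).1| +
                       |(cs.getD i (0,0)).2 - (cs.getD j (0,0)).2| ≤ dm
      · have hcl : pvClose cs dm i j = true := by
          unfold pvClose
          rw [decide_eq_true (show i ≠ j from hij), decide_eq_true hdist]
          rfl
        have hfil : (j :: L).filter (pvClose cs dm i) = j :: L.filter (pvClose cs dm i) := by
          simp [hcl]
        have hacc : (let distance := |(cs.getD i (0,0)).1 - (cs.getD j (0,0)).1| +
                        |(cs.getD i (0,0)).2 - (cs.getD j (0,0)).2|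
            if distance ≤ dm then d'.insert (i : Int) (d'.getD (i : Int) [] ++ [(j : Int)])
            else d') = d'.insert (i : Int) (l0 ++ [(j : Int)]) := by
          show (if |(cs.getD i (0,0)).1 - (cs.getD j (0,0)).1| +
                   |(cs.getD i (0,0)).2 - (cs.getD j (0,0)).2| ≤ dm then
              d'.insert (i : Int) (d'.getD (i : Int) [] ++ [(j : Int)]) else d') = _
          rw [if_pos hdist, pvDictGetD g d' i l0 hg hnd hd]
        rw [hfil, List.map_cons,
            show l0 ++ Int.ofNat j :: (L.filter (pvClose cs dm i)).map (fun j => Int.ofNat j)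
               = (l0 ++ [(j : Int)]) ++ (L.filter (pvClose cs dm i)).map (fun j => Int.ofNat j)
             from List.append_cons _ _ _, hacc]
        have hnext : (d'.insert (i : Int) (l0 ++ [(j : Int)])).items
            = g.items ++ pvWrap i (l0 ++ [(j : Int)]) := by
          rw [pvDictInsert g d' i l0 (l0 ++ [(j : Int)]) hg hnd hd]
          simp [pvWrap]
        exact ih g _ (l0 ++ [(j : Int)]) hg hnd hnext
      · have hcl : pvClose cs dm i j = false := by
          unfold pvClose
          rw [decide_eq_false hdist]
          simp
        have hfil : (j :: L).filter (pvClose cs dm i) = L.filter (pvClose cs dm i) := by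
          simp [hcl]
        have hacc : (let distance := |(cs.getD i (0,0)).1 - (cs.getD j (0,0)).1| +
                        |(cs.getD i (0,0)).2 - (cs.getD j (0,0)).2|
            if distance ≤ dm then d'.insert (i : Int) (d'.getD (i : Int) [] ++ [(j : Int)])
            else d') = d' := by
          show (if |(cs.getD i (0,0)).1 - (cs.getD j (0,0)).1| +
                   |(cs.getD i (0,0)).2 - (cs.getD j (0,0)).2| ≤ dm then
              d'.insert (i : Int) (d'.getD (i : Int) [] ++ [(j : Int)]) else d') = _
          rw [if_neg hdist]
        rw [hacc, hfil]
        exact ih g d' l0 hg hnd hd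

-- generic assembly fold: each step appends pvWrap i (f i) to the items of a dict with fresh keys
lemma pvAssemble (f : Nat → List Int)
    (step : PySem.Dict Int (List Int) → Nat → PySem.Dict Int (List Int)) :
    ∀ (L : List Nat), L.Nodup →
    (∀ (d : PySem.Dict Int (List Int)) (i : Nat), i ∈ L → d.contains (i : Int) = false →
        d.keys.Nodup → (step d i).items = d.items ++ pvWrap i (f i)) →
    ∀ (g : PySem.Dict Int (List Int)), (∀ i ∈ L, g.contains (i : Int) = false) → g.keys.Nodup →
    (L.foldl step g).items = g.items ++ L.flatMap (fun i => pvWrap i (f i)) := by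
  intro L
  induction L with
  | nil => intro _ _ g _ _; simp
  | cons i L ih =>
    intro hL hstep g hg hnd
    rw [List.foldl_cons]
    have hgi : g.contains (i : Int) = false := hg i (List.mem_cons_self)
    have hstepi := hstep g i (List.mem_cons_self) hgi hnd
    have hmem : (i : Int) ∉ g.keys := by
      intro h
      rw [← PySem.Dict.contains_iff_mem_keys] at h
      rw [hgi] at h; cases h
    have hkeys : (step g i).keys = g.keys ++ (pvWrap i (f i)).map Prod.fst := by
      simp only [PySem.Dict.keys, hstepi, List.map_append]
    have hnd' : (step g i).keys.Nodup := by
      rw [hkeys]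
      by_cases h0 : f i = []
      · simp [pvWrap, h0, hnd]
      · simp [pvWrap, h0, List.nodup_append, hnd]
        intro a ha he
        exact hmem (he ▸ ha)
    have hg' : ∀ i' ∈ L, (step g i).contains ((i' : Nat) : Int) = false := by
      intro i' hi'
      have hne : i' ≠ i := fun he => (List.nodup_cons.1 hL).1 (he ▸ hi')
      have hgi' : ((i' : Nat) : Int) ∉ g.keys := by
        intro h
        rw [← PySem.Dict.contains_iff_mem_keys] at h
        rw [hg i' (List.mem_cons_of_mem i hi')] at h
        cases h
      rw [PySem.Dict.contains_eq_decide_mem_keys, hkeys, decide_eq_false_iff_not]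
      intro h
      rcases List.mem_append.1 h with h | h
      · exact hgi' h
      · by_cases h0 : f i = []
        · simp [pvWrap, h0] at h
        · simp only [pvWrap, if_neg h0, List.map_cons, List.map_nil, List.mem_singleton] at h
          exact hne (by exact_mod_cast h)
    rw [ih (List.nodup_cons.1 hL).2
        (fun d i' hi' => hstep d i' (List.mem_cons_of_mem i hi')) (step g i) hg' hnd',
      hstepi, List.flatMap_cons, List.append_assoc]

-- A computes the canonical adjacency dict
lemma graph_create_eq_canon (cs : List (Int × Int)) (dm : Int) :
    graph_create cs dm = pvCanon cs dm := by
  unfold graph_create pvCanon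
  have h := pvAssemble (pvNbrs cs dm)
    (fun graph i =>
      (List.range cs.length).foldl (fun graph j =>
        if i = j then graph
        else
          let distance := |(cs.getD i (0,0)).1 - (cs.getD j (0,0)).1| +
                          |(cs.getD i (0,0)).2 - (cs.getD j (0,0)).2|
          if distance ≤ dm then
            graph.insert (i : Int) (graph.getD (i : Int) [] ++ [(j : Int)])
          else graph) graph)
    (List.range cs.length) (List.nodup_range)
    (by
      intro d i _ hdi hdnd
      have := pvInnerA cs dm i (List.range cs.length) d d [] hdi hdnd (by simp [pvWrap])
      rw [this, List.nil_append]
      simp only [pvNbrs])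
    PySem.Dict.empty (by intro i _; simp) (by simp)
  rw [h]
  rfl

-- ==== B-side proof ====

-- sorted2 with two Int keys is sorted with the lexicographic key
lemma pvSorted2_eq_sorted_lex {α : Type} (xs : List α) (k1 k2 : α → Int) :
    PySem.List.sorted2 xs k1 k2
      = PySem.List.sorted xs (fun x => (toLex (k1 x, k2 x) : Lex (Int × Int))) := by
  rw [PySem.List.sorted_eq_foldl_insertBy]
  have hfun : (fun (a b : α) =>
        decide (k1 a < k1 b) || (!decide (k1 b < k1 a) && decide (k2 a < k2 b)))
      = fun a b => decide ((toLex (k1 a, k2 a) : Lex (Int × Int)) < toLex (k1 b, k2 b)) := by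
    funext a b
    rcases lt_trichotomy (k1 a) (k1 b) with h|h|h
    · simp [h, Prod.Lex.toLex_lt_toLex, lt_asymm h]
    · simp [h, Prod.Lex.toLex_lt_toLex]
    · have h1 : ¬ k1 a < k1 b := lt_asymm h
      simp [Prod.Lex.toLex_lt_toLex, h, h1]
      intro he
      exact absurd he.symm (ne_of_lt h)
  show List.foldl (fun acc x => PySem.List.insertBy (fun a b =>
        decide (k1 a < k1 b) || (!decide (k1 b < k1 a) && decide (k2 a < k2 b))) x acc) [] xs
      = List.foldl (fun acc x => PySem.List.insertBy (fun a b =>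
        decide ((toLex (k1 a, k2 a) : Lex (Int × Int)) < toLex (k1 b, k2 b))) x acc) [] xs
  rw [hfun]

-- appends at a single fresh key accumulate at the end
lemma pvInnerApp (i : Nat) (l : List Int) :
    ∀ (g d' : PySem.Dict Int (List Int)) (l0 : List Int),
    g.contains (i : Int) = false → g.keys.Nodup →
    d'.items = g.items ++ pvWrap i l0 →
    (l.foldl (fun g j => g.insert (i : Int) (g.getD (i : Int) [] ++ [j])) d').items
      = g.items ++ pvWrap i (l0 ++ l) := by
  induction l with
  | nil =>
    intro g d' l0 hg hnd hd
    simpa using hd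
  | cons j l ih =>
    intro g d' l0 hg hnd hd
    rw [List.foldl_cons]
    have hget := pvDictGetD g d' i l0 hg hnd hd
    have hnext : (d'.insert (i : Int) (d'.getD (i : Int) [] ++ [j])).items
        = g.items ++ pvWrap i (l0 ++ [j]) := by
      rw [hget, pvDictInsert g d' i l0 (l0 ++ [j]) hg hnd hd]
      simp [pvWrap]
    have := ih g _ (l0 ++ [j]) hg hnd hnext
    rw [this]
    simp

-- grouping the canonical edge list yields the canonical dict
lemma pvGroup_eq_canon (cs : List (Int × Int)) (dm : Int) :
    ((pvEdgesC cs dm).foldl (fun g e => g.insert e.1 (g.getD e.1 [] ++ [e.2]))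
      (PySem.Dict.empty : PySem.Dict Int (List Int))).items = pvCanon cs dm := by
  unfold pvEdgesC pvCanon
  rw [List.foldl_flatMap]
  have h := pvAssemble (pvNbrs cs dm)
    (fun g a => ((pvNbrs cs dm a).map (fun j => ((a : Int), j))).foldl
        (fun g e => g.insert e.1 (g.getD e.1 [] ++ [e.2])) g)
    (List.range cs.length) List.nodup_range
    (by
      intro d a _ hda hnd
      dsimp only
      rw [List.foldl_map]
      simpa using pvInnerApp a (pvNbrs cs dm a) d d [] hda hnd (by simp [pvWrap]))
    PySem.Dict.empty (by intro i _; simp) (by simp)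
  rw [h]
  rfl

-- the unsorted triple list
def pvP (cs : List (Int × Int)) : List (Int × Int × Int) :=
  (PySem.List.enumerate cs).map (fun p => (p.2.1 + p.2.2, p.2.1 - p.2.2, p.1))

lemma pvPts_perm (cs : List (Int × Int)) : (pvMkPts cs).Perm (pvP cs) :=
  PySem.List.sorted2_perm _ _ _ _

lemma pvPts_length (cs : List (Int × Int)) : (pvMkPts cs).length = cs.length := by
  rw [(pvPts_perm cs).length_eq]
  simp [pvP, PySem.List.length_enumerate]

lemma pvMem_pvP (cs : List (Int × Int)) (t : Int × Int × Int) :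
    t ∈ pvP cs ↔ ∃ a, ∃ _ : a < cs.length,
      t = (cs[a].1 + cs[a].2, cs[a].1 - cs[a].2, (a : Int)) := by
  unfold pvP
  rw [List.mem_map]
  constructor
  · rintro ⟨p, hp, rfl⟩
    rw [PySem.List.mem_enumerate_iff] at hp
    obtain ⟨k, hk, rfl⟩ := hp
    exact ⟨k, hk, by simp⟩
  · rintro ⟨a, ha, rfl⟩
    refine ⟨((a : Int), cs[a]), ?_, by simp⟩
    rw [PySem.List.mem_enumerate_iff]
    exact ⟨a, ha, by simp⟩

-- each position of pts carries the rotated triple of some city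
lemma pvPts_pos (cs : List (Int × Int)) (p : Nat) (hp : p < cs.length) :
    ∃ a, ∃ _ : a < cs.length,
      (pvMkPts cs).getD p (0,0,0) = (cs[a].1 + cs[a].2, cs[a].1 - cs[a].2, (a : Int)) := by
  have hl : p < (pvMkPts cs).length := by rw [pvPts_length]; exact hp
  rw [List.getD_eq_getElem _ _ hl]
  have hm : (pvMkPts cs)[p] ∈ pvP cs := (pvPts_perm cs).mem_iff.1 (List.getElem_mem hl)
  rw [pvMem_pvP] at hm
  exact hm

-- first components of pts are monotone in the position
lemma pvPts_umono (cs : List (Int × Int)) (a b : Nat) (hab : a ≤ b) (hb : b < cs.length) :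
    ((pvMkPts cs).getD a (0,0,0)).1 ≤ ((pvMkPts cs).getD b (0,0,0)).1 := by
  rcases Nat.eq_or_lt_of_le hab with rfl|h
  · exact le_rfl
  have ha : a < (pvMkPts cs).length := by rw [pvPts_length]; omega
  have hbl : b < (pvMkPts cs).length := by rw [pvPts_length]; exact hb
  have hs : pvMkPts cs
      = PySem.List.sorted (pvP cs) (fun t => (toLex (t.1, t.2.1) : Lex (Int × Int))) := by
    unfold pvMkPts
    rw [pvSorted2_eq_sorted_lex]
    rfl
  have hpw := PySem.List.sorted_pairwise (pvP cs) (fun t => (toLex (t.1, t.2.1) : Lex (Int × Int)))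
  rw [← hs, List.pairwise_iff_getElem] at hpw
  have hle := hpw a b ha hbl h
  rw [List.getD_eq_getElem _ _ ha, List.getD_eq_getElem _ _ hbl]
  rw [Prod.Lex.toLex_le_toLex] at hle
  rcases hle with h'|⟨h', _⟩
  · exact le_of_lt h'
  · exact le_of_eq h' 

-- the index components of pts are pairwise distinct
lemma pvPts_idx_inj (cs : List (Int × Int)) (p q : Nat) (hp : p < cs.length) (hq : q < cs.length)
    (h : ((pvMkPts cs).getD p (0,0,0)).2.2 = ((pvMkPts cs).getD q (0,0,0)).2.2) : p = q := by
  have hp' : p < (pvMkPts cs).length := by rw [pvPts_length]; exact hp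
  have hq' : q < (pvMkPts cs).length := by rw [pvPts_length]; exact hq
  have hnd : ((pvMkPts cs).map (fun t => t.2.2)).Nodup := by
    have hperm : ((pvMkPts cs).map (fun t => t.2.2)).Perm ((pvP cs).map (fun t => t.2.2)) :=
      (pvPts_perm cs).map _
    rw [hperm.nodup_iff]
    unfold pvP
    rw [List.map_map]
    have hco : ((fun (t : Int × Int × Int) => t.2.2)
        ∘ (fun p : Int × (Int × Int) => (p.2.1 + p.2.2, p.2.1 - p.2.2, p.1)))
        = fun p : Int × (Int × Int) => p.1 := rfl
    rw [hco, PySem.List.map_fst_enumerate]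
    exact PySem.List.nodup_pyRange_one _ _
  rw [List.getD_eq_getElem _ _ hp', List.getD_eq_getElem _ _ hq'] at h
  have hmap : ((pvMkPts cs).map (fun t => t.2.2))[p]'(by simpa using hp')
      = ((pvMkPts cs).map (fun t => t.2.2))[q]'(by simpa using hq') := by
    rw [List.getElem_map, List.getElem_map]
    exact h
  exact hnd.getElem_inj_iff.1 hmap

-- the pairs the sweep collects while standing at position p
def pvBlock (cs : List (Int × Int)) (dm : Int) (p : Nat) : List (Int × Int) :=
  ((List.range p).reverse.filter (fun q =>
      decide (((pvMkPts cs).getD p (0,0,0)).1 - ((pvMkPts cs).getD q (0,0,0)).1 ≤ dm)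
        && decide (|((pvMkPts cs).getD p (0,0,0)).2.1 - ((pvMkPts cs).getD q (0,0,0)).2.1| ≤ dm))).flatMap
    (fun q => [(((pvMkPts cs).getD p (0,0,0)).2.2, ((pvMkPts cs).getD q (0,0,0)).2.2),
               (((pvMkPts cs).getD q (0,0,0)).2.2, ((pvMkPts cs).getD p (0,0,0)).2.2)])

-- the while loop scans exactly the window the sorted order allows
lemma pvWhile_spec (pts : List (Int × Int × Int)) (dm u v i : Int)
    (hmono : ∀ a b : Nat, a ≤ b → b < pts.length →
      (pts.getD a (0,0,0)).1 ≤ (pts.getD b (0,0,0)).1) :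
    ∀ (q0 : Nat), q0 ≤ pts.length → ∀ (edges : List (Int × Int)),
    pvWhile pts dm u v i q0 edges
      = edges ++ ((List.range q0).reverse.filter (fun q =>
            decide (u - (pts.getD q (0,0,0)).1 ≤ dm)
              && decide (|v - (pts.getD q (0,0,0)).2.1| ≤ dm))).flatMap
          (fun q => [(i, (pts.getD q (0,0,0)).2.2), ((pts.getD q (0,0,0)).2.2, i)]) := by
  intro q0
  induction q0 with
  | zero =>
    intro _ edges
    simp [pvWhile]
  | succ q ih =>
    intro hle edges
    have hq : q < pts.length := hle
    have hrev : (List.range (q+1)).reverse = q :: (List.range q).reverse := by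
      rw [List.range_succ, List.reverse_append]
      rfl
    rw [hrev, List.filter_cons]
    simp only [pvWhile]
    by_cases hu : u - (pts.getD q (0,0,0)).1 ≤ dm
    · rw [if_pos hu]
      by_cases hv : |v - (pts.getD q (0,0,0)).2.1| ≤ dm
      · have hcond : (decide (u - (pts.getD q (0,0,0)).1 ≤ dm)
            && decide (|v - (pts.getD q (0,0,0)).2.1| ≤ dm)) = true := by
          rw [Bool.and_eq_true, decide_eq_true_eq, decide_eq_true_eq]
          exact ⟨hu, hv⟩
        rw [if_pos hv, ih (le_of_lt hq), if_pos hcond, List.flatMap_cons]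
        simp
      · have hcond : ¬ (decide (u - (pts.getD q (0,0,0)).1 ≤ dm)
            && decide (|v - (pts.getD q (0,0,0)).2.1| ≤ dm)) = true := by
          rw [Bool.and_eq_true, decide_eq_true_eq, decide_eq_true_eq]
          exact fun h => hv h.2
        rw [if_neg hv, ih (le_of_lt hq), if_neg hcond]
    · have hcond : ¬ (decide (u - (pts.getD q (0,0,0)).1 ≤ dm)
          && decide (|v - (pts.getD q (0,0,0)).2.1| ≤ dm)) = true := by
        rw [Bool.and_eq_true, decide_eq_true_eq, decide_eq_true_eq]
        exact fun h => hu h.1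
      rw [if_neg hu, if_neg hcond]
      have hfil : List.filter (fun q' =>
            decide (u - (pts.getD q' (0,0,0)).1 ≤ dm)
              && decide (|v - (pts.getD q' (0,0,0)).2.1| ≤ dm)) (List.range q).reverse = [] := by
        rw [List.filter_eq_nil_iff]
        intro a ha
        rw [List.mem_reverse, List.mem_range] at ha
        have hm := hmono a q (le_of_lt ha) hq
        have h2 : ¬ (u - (pts.getD a (0,0,0)).1 ≤ dm) := by omega
        rw [Bool.and_eq_true, decide_eq_true_eq, decide_eq_true_eq]
        exact fun h => h2 h.1
      rw [hfil]
      simp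

-- the edges list B builds is the concatenation of the per-position blocks
lemma pvEdges_sweep (cs : List (Int × Int)) (dm : Int) :
    (List.range (pvMkPts cs).length).foldl (fun edges p =>
        let t := (pvMkPts cs).getD p (0, 0, 0)
        pvWhile (pvMkPts cs) dm t.1 t.2.1 t.2.2 p edges) []
      = (List.range cs.length).flatMap (pvBlock cs dm) := by
  have hlen : (pvMkPts cs).length = cs.length := pvPts_length cs
  rw [hlen]
  have hcong : ∀ (acc : List (Int × Int)), ∀ p ∈ List.range cs.length,
      (fun edges p =>
        let t := (pvMkPts cs).getD p (0, 0, 0)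
        pvWhile (pvMkPts cs) dm t.1 t.2.1 t.2.2 p edges) acc p
      = (fun edges p => edges ++ pvBlock cs dm p) acc p := by
    intro acc p hp
    rw [List.mem_range] at hp
    have hmono : ∀ a b : Nat, a ≤ b → b < (pvMkPts cs).length →
        ((pvMkPts cs).getD a (0,0,0)).1 ≤ ((pvMkPts cs).getD b (0,0,0)).1 := by
      intro a b hab hbl
      exact pvPts_umono cs a b hab (by rwa [hlen] at hbl)
    have hple : p ≤ (pvMkPts cs).length := by rw [hlen]; omega
    exact pvWhile_spec (pvMkPts cs) dm _ _ _ hmono p hple acc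
  rw [PySem.List.foldl_congr_mem _ _ _ _ hcong, PySem.List.foldl_append_eq_flatMap]
  rfl

-- Manhattan distance is the Chebyshev distance of the rotated coordinates
lemma pvManhattan (x1 y1 x2 y2 : Int) :
    |x1 - x2| + |y1 - y2| = max |(x1 + y1) - (x2 + y2)| |(x1 - y1) - (x2 - y2)| := by
  rcases abs_cases (x1 - x2) with ⟨h1, h1'⟩|⟨h1, h1'⟩ <;>
    rcases abs_cases (y1 - y2) with ⟨h2, h2'⟩|⟨h2, h2'⟩ <;>
    rcases abs_cases ((x1 + y1) - (x2 + y2)) with ⟨h3, h3'⟩|⟨h3, h3'⟩ <;>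
    rcases abs_cases ((x1 - y1) - (x2 - y2)) with ⟨h4, h4'⟩|⟨h4, h4'⟩ <;>
    rcases max_cases |(x1 + y1) - (x2 + y2)| |(x1 - y1) - (x2 - y2)| with ⟨h5, h5'⟩|⟨h5, h5'⟩ <;>
    omega

lemma pvMem_edgesC (cs : List (Int × Int)) (dm : Int) (e : Int × Int) :
    e ∈ pvEdgesC cs dm ↔ ∃ a b : Nat, a < cs.length ∧ b < cs.length ∧
      pvClose cs dm a b = true ∧ e = ((a : Int), (b : Int)) := by
  unfold pvEdgesC pvNbrs
  simp only [List.mem_flatMap, List.mem_map, List.mem_range, List.mem_filter]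
  constructor
  · rintro ⟨a, ha, j, ⟨b, ⟨hb, hcl⟩, rfl⟩, rfl⟩
    exact ⟨a, b, ha, hb, hcl, rfl⟩
  · rintro ⟨a, b, ha, hb, hcl, rfl⟩
    exact ⟨a, ha, (b : Int), ⟨b, ⟨hb, hcl⟩, rfl⟩, rfl⟩

lemma pvMem_block (cs : List (Int × Int)) (dm : Int) (p : Nat) (e : Int × Int) :
    e ∈ pvBlock cs dm p ↔ ∃ q, q < p ∧
      (((pvMkPts cs).getD p (0,0,0)).1 - ((pvMkPts cs).getD q (0,0,0)).1 ≤ dm) ∧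
      (|((pvMkPts cs).getD p (0,0,0)).2.1 - ((pvMkPts cs).getD q (0,0,0)).2.1| ≤ dm) ∧
      (e = (((pvMkPts cs).getD p (0,0,0)).2.2, ((pvMkPts cs).getD q (0,0,0)).2.2) ∨
       e = (((pvMkPts cs).getD q (0,0,0)).2.2, ((pvMkPts cs).getD p (0,0,0)).2.2)) := by
  unfold pvBlock
  simp only [List.mem_flatMap, List.mem_filter, List.mem_reverse, List.mem_range,
    Bool.and_eq_true, decide_eq_true_eq, List.mem_cons, List.not_mem_nil, or_false]
  constructor
  · rintro ⟨q, ⟨hq, hu, hv⟩, hor⟩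
    exact ⟨q, hq, hu, hv, hor⟩
  · rintro ⟨q, hq, hu, hv, hor⟩
    exact ⟨q, ⟨hq, hu, hv⟩, hor⟩

-- the sweep collects exactly the close ordered pairs
lemma pvSweep_mem (cs : List (Int × Int)) (dm : Int) (e : Int × Int) :
    e ∈ (List.range cs.length).flatMap (pvBlock cs dm) ↔ e ∈ pvEdgesC cs dm := by
  constructor
  · intro h
    rw [List.mem_flatMap] at h
    obtain ⟨p, hp, hbl⟩ := h
    rw [List.mem_range] at hp
    rw [pvMem_block] at hbl
    obtain ⟨q, hqp, hu, hv, hor⟩ := hbl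
    have hqn : q < cs.length := lt_trans hqp hp
    obtain ⟨a, ha, hta⟩ := pvPts_pos cs p hp
    obtain ⟨b, hb, htb⟩ := pvPts_pos cs q hqn
    have hmono := pvPts_umono cs q p (le_of_lt hqp) hp
    rw [hta, htb] at hu hv hor hmono
    dsimp only at hu hv hor hmono
    have hdu : |(cs[a].1 + cs[a].2) - (cs[b].1 + cs[b].2)| ≤ dm := by
      rcases abs_cases ((cs[a].1 + cs[a].2) - (cs[b].1 + cs[b].2)) with ⟨h', _⟩|⟨h', _⟩ <;> omega
    have hdist : |cs[a].1 - cs[b].1| + |cs[a].2 - cs[b].2| ≤ dm := by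
      rw [pvManhattan]
      exact max_le hdu hv
    have hab : a ≠ b := by
      intro he
      subst he
      have hpq := pvPts_idx_inj cs p q hp hqn (by rw [hta, htb])
      omega
    have hclab : pvClose cs dm a b = true := by
      unfold pvClose
      rw [List.getD_eq_getElem _ _ ha, List.getD_eq_getElem _ _ hb]
      simp [hab, hdist]
    rw [pvMem_edgesC]
    rcases hor with rfl|rfl
    · exact ⟨a, b, ha, hb, hclab, rfl⟩
    · exact ⟨b, a, hb, ha, by rw [pvClose_symm]; exact hclab, rfl⟩
  · intro h
    rw [pvMem_edgesC] at h
    obtain ⟨a, b, ha, hb, hcl, rfl⟩ := h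
    unfold pvClose at hcl
    rw [List.getD_eq_getElem _ _ ha, List.getD_eq_getElem _ _ hb] at hcl
    rw [Bool.and_eq_true, decide_eq_true_eq, decide_eq_true_eq] at hcl
    obtain ⟨hab, hdist⟩ := hcl
    have hdu : |(cs[a].1 + cs[a].2) - (cs[b].1 + cs[b].2)| ≤ dm := by
      rw [pvManhattan cs[a].1 cs[a].2 cs[b].1 cs[b].2] at hdist
      exact le_trans (le_max_left _ _) hdist
    have hdv : |(cs[a].1 - cs[a].2) - (cs[b].1 - cs[b].2)| ≤ dm := by
      rw [pvManhattan cs[a].1 cs[a].2 cs[b].1 cs[b].2] at hdist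
      exact le_trans (le_max_right _ _) hdist
    have hma : (cs[a].1 + cs[a].2, cs[a].1 - cs[a].2, (a : Int)) ∈ pvMkPts cs :=
      (pvPts_perm cs).mem_iff.2 ((pvMem_pvP cs _).2 ⟨a, ha, rfl⟩)
    have hmb : (cs[b].1 + cs[b].2, cs[b].1 - cs[b].2, (b : Int)) ∈ pvMkPts cs :=
      (pvPts_perm cs).mem_iff.2 ((pvMem_pvP cs _).2 ⟨b, hb, rfl⟩)
    obtain ⟨p, hpl, hpe⟩ := List.getElem_of_mem hma
    obtain ⟨q, hql, hqe⟩ := List.getElem_of_mem hmb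
    have hpn : p < cs.length := by rw [← pvPts_length cs]; exact hpl
    have hqn : q < cs.length := by rw [← pvPts_length cs]; exact hql
    have hgp : (pvMkPts cs).getD p (0,0,0) = (cs[a].1 + cs[a].2, cs[a].1 - cs[a].2, (a : Int)) := by
      rw [List.getD_eq_getElem _ _ hpl]; exact hpe
    have hgq : (pvMkPts cs).getD q (0,0,0) = (cs[b].1 + cs[b].2, cs[b].1 - cs[b].2, (b : Int)) := by
      rw [List.getD_eq_getElem _ _ hql]; exact hqe
    have hpq : p ≠ q := by
      intro he
      apply hab
      have := hgp.symm.trans (he ▸ hgq)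
      have h22 := congrArg (fun t : Int × Int × Int => t.2.2) this
      dsimp only at h22
      exact_mod_cast h22
    rw [List.mem_flatMap]
    rcases Nat.lt_or_ge q p with hlt|hge
    · refine ⟨p, List.mem_range.2 hpn, ?_⟩
      rw [pvMem_block]
      refine ⟨q, hlt, ?_, ?_, Or.inl (by rw [hgp, hgq])⟩
      · rw [hgp, hgq]
        have hm := pvPts_umono cs q p (le_of_lt hlt) hpn
        rw [hgp, hgq] at hm
        dsimp only at hm ⊢
        rcases abs_cases ((cs[a].1 + cs[a].2) - (cs[b].1 + cs[b].2)) with ⟨h', _⟩|⟨h', _⟩ <;> omega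
      · rw [hgp, hgq]
        exact hdv
    · have hlt : p < q := by omega
      refine ⟨q, List.mem_range.2 hqn, ?_⟩
      rw [pvMem_block]
      refine ⟨p, hlt, ?_, ?_, Or.inr (by rw [hgp, hgq])⟩
      · rw [hgp, hgq]
        have hm := pvPts_umono cs p q (le_of_lt hlt) hqn
        rw [hgp, hgq] at hm
        dsimp only at hm ⊢
        rcases abs_cases ((cs[a].1 + cs[a].2) - (cs[b].1 + cs[b].2)) with ⟨h', _⟩|⟨h', _⟩ <;> omega
      · rw [hgp, hgq]
        dsimp only
        rw [abs_sub_comm]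
        exact hdv

lemma pvSweep_nodup (cs : List (Int × Int)) (dm : Int) :
    ((List.range cs.length).flatMap (pvBlock cs dm)).Nodup := by
  have idx := pvPts_idx_inj cs
  rw [List.nodup_flatMap]
  constructor
  · intro p hp
    rw [List.mem_range] at hp
    unfold pvBlock
    rw [List.nodup_flatMap]
    constructor
    · intro q hq
      rw [List.mem_filter, List.mem_reverse, List.mem_range] at hq
      have hqn : q < cs.length := lt_trans hq.1 hp
      have hne : ((pvMkPts cs).getD p (0,0,0)).2.2 ≠ ((pvMkPts cs).getD q (0,0,0)).2.2 := by
        intro he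
        have := idx p q hp hqn he
        omega
      refine List.nodup_cons.2 ⟨?_, List.nodup_singleton _⟩
      rw [List.mem_singleton]
      intro he
      rw [Prod.mk.injEq] at he
      exact hne he.1
    · have hnd : ((List.range p).reverse.filter (fun q =>
          decide (((pvMkPts cs).getD p (0,0,0)).1 - ((pvMkPts cs).getD q (0,0,0)).1 ≤ dm)
            && decide (|((pvMkPts cs).getD p (0,0,0)).2.1 - ((pvMkPts cs).getD q (0,0,0)).2.1| ≤ dm))).Nodup :=
        (List.nodup_reverse.2 List.nodup_range).filter _
      refine hnd.imp_of_mem ?_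
      intro q1 q2 hm1 hm2 hne12
      rw [List.mem_filter, List.mem_reverse, List.mem_range] at hm1 hm2
      have h1n : q1 < cs.length := lt_trans hm1.1 hp
      have h2n : q2 < cs.length := lt_trans hm2.1 hp
      intro e he1 he2
      rw [List.mem_cons, List.mem_singleton] at he1 he2
      rcases he1 with rfl|rfl <;> rcases he2 with he|he <;> rw [Prod.mk.injEq] at he
      · have := idx q1 q2 h1n h2n he.2
        omega
      · have := idx p q2 hp h2n he.1
        omega
      · have := idx q1 p h1n hp he.1
        omega
      · have := idx q1 q2 h1n h2n he.1
        omega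
  · refine List.pairwise_lt_range.imp_of_mem ?_
    intro p1 p2 hm1 hm2 hlt
    rw [List.mem_range] at hm1 hm2
    intro e he1 he2
    rw [pvMem_block] at he1 he2
    obtain ⟨q1, hq1, _, _, ho1⟩ := he1
    obtain ⟨q2, hq2, _, _, ho2⟩ := he2
    have h1n : q1 < cs.length := lt_trans hq1 hm1
    have h2n : q2 < cs.length := lt_trans hq2 hm2
    rcases ho1 with rfl|rfl <;> rcases ho2 with he|he <;> rw [Prod.mk.injEq] at he
    · have := idx p1 p2 hm1 hm2 he.1
      omega
    · have := idx q1 p2 h1n hm2 he.2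
      omega
    · have := idx q1 p2 h1n hm2 he.1
      omega
    · have := idx p1 p2 hm1 hm2 he.2
      omega

lemma pvEdgesC_pairwise (cs : List (Int × Int)) (dm : Int) :
    (pvEdgesC cs dm).Pairwise (fun a b =>
      (toLex (a.1, a.2) : Lex (Int × Int)) < toLex (b.1, b.2)) := by
  have aux : ∀ m : Nat,
      ((List.range m).flatMap (fun a => (pvNbrs cs dm a).map (fun j => ((a : Int), j)))).Pairwise
        (fun x y => (toLex (x.1, x.2) : Lex (Int × Int)) < toLex (y.1, y.2)) := by
    intro m
    induction m with
    | zero => simp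
    | succ m ih =>
      rw [List.range_succ, List.flatMap_append, List.pairwise_append]
      refine ⟨ih, ?_, ?_⟩
      · rw [List.flatMap_cons, List.flatMap_nil, List.append_nil, List.pairwise_map]
        have hnb : (pvNbrs cs dm m).Pairwise (· < ·) := by
          unfold pvNbrs
          rw [List.pairwise_map]
          exact (List.pairwise_lt_range.filter _).imp (fun h => Int.ofNat_lt.2 h)
        exact hnb.imp (fun h => by
          rw [Prod.Lex.toLex_lt_toLex]
          exact Or.inr ⟨rfl, h⟩)
      · intro x hx y hy
        rw [List.mem_flatMap] at hx
        obtain ⟨a, ha, hx⟩ := hx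
        rw [List.mem_range] at ha
        rw [List.mem_map] at hx
        obtain ⟨j, _, rfl⟩ := hx
        rw [List.flatMap_cons, List.flatMap_nil, List.append_nil, List.mem_map] at hy
        obtain ⟨j', _, rfl⟩ := hy
        rw [Prod.Lex.toLex_lt_toLex]
        left
        show (a : Int) < (m : Int)
        exact_mod_cast ha
  exact aux cs.length

lemma pvEdgesC_nodup (cs : List (Int × Int)) (dm : Int) : (pvEdgesC cs dm).Nodup := by
  refine (pvEdgesC_pairwise cs dm).imp ?_
  intro a b h heq
  rw [heq] at h
  exact lt_irrefl _ h

-- sorting the sweep's edge list yields the canonical edge list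
lemma pvSortedEdges (cs : List (Int × Int)) (dm : Int) :
    PySem.List.sorted2 ((List.range cs.length).flatMap (pvBlock cs dm))
        (fun e => e.1) (fun e => e.2)
      = pvEdgesC cs dm := by
  rw [pvSorted2_eq_sorted_lex]
  apply PySem.List.sorted_eq_of_perm_of_pairwise_lt
  · exact (List.perm_ext_iff_of_nodup (pvEdgesC_nodup cs dm) (pvSweep_nodup cs dm)).2
      (fun e => (pvSweep_mem cs dm e).symm)
  · exact pvEdgesC_pairwise cs dm

-- B computes the canonical adjacency dict
lemma graph_create_alt_eq_canon (cs : List (Int × Int)) (dm : Int) :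
    graph_create_alt cs dm = pvCanon cs dm := by
  show ((PySem.List.sorted2
      ((List.range (pvMkPts cs).length).foldl (fun edges p =>
        let t := (pvMkPts cs).getD p (0, 0, 0)
        pvWhile (pvMkPts cs) dm t.1 t.2.1 t.2.2 p edges) [])
      (fun e => e.1) (fun e => e.2)).foldl
      (fun g e => g.insert e.1 (g.getD e.1 [] ++ [e.2]))
      (PySem.Dict.empty : PySem.Dict Int (List Int))).items = pvCanon cs dm
  rw [pvEdges_sweep, pvSortedEdges]
  exact pvGroup_eq_canon cs dm

-- ===== VERDICT (by name: the statement is the Claim_ definition above) =====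
theorem graph_create_spec : Claim_equal_graph_create := by
  intro cs dm _
  unfold Spec_graph_create
  rw [graph_create_eq_canon, graph_create_alt_eq_canon]
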